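-- pv_equiv track=rewrite | github.com/HollyMaeRobertson/sequence_tools | checks.py | not_in_interest
-- ===== SOURCE A (Python) =====
-- def not_in_interest(sequences, interest):
--     '''finds all the sites that are not identical
--     in the sequences of interest'''
--     first_seq = sequences[interest[0]]
--     associations = []
--
--     other = list(sequences.keys())
--
--     for i in interest:
--         other.remove(i)
--
--     for j in range(len(first_seq)):
--         counter = 0
--         for i in other:
--             a = sequences[i]
--             if a[j] != first_seq[j]:
--                 counter += 1
--             else:
--                 continue
--
--         if counter > 0:
--             associations.append(j)
--
--     return(associations)
-- ===== SOURCE B (Python) =====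
-- def _without(keys, interest):
--     '''keys minus the interest names (ValueError if one is absent)'''
--     if not interest:
--         return keys
--     keys.remove(interest[0])
--     return _without(keys, interest[1:])
--
-- def not_in_interest(sequences, interest):
--     '''finds all the sites that are not identical
--     in the sequences of interest'''
--     first_seq = sequences[interest[0]]
--
--     others = [sequences[name] for name in _without(list(sequences), interest)]
--
--     diff_sites = set()
--     for seq in others:
--         for j in range(len(first_seq)):
--             if seq[j] != first_seq[j]:
--                 diff_sites.add(j)
--
--     return sorted(diff_sites)
-- ===== Notes on version B (the rewrite author's own statement) =====
-- stated objective: alternative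
-- what changed: B strips the interest keys by recursion, looks each remaining sequence up once into a list (A re-reads the dict in its inner loop), and replaces A's per-position counter-and-append scan with a set of differing positions collected sequence-by-sequence and sorted at the end.
import Mathlib
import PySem

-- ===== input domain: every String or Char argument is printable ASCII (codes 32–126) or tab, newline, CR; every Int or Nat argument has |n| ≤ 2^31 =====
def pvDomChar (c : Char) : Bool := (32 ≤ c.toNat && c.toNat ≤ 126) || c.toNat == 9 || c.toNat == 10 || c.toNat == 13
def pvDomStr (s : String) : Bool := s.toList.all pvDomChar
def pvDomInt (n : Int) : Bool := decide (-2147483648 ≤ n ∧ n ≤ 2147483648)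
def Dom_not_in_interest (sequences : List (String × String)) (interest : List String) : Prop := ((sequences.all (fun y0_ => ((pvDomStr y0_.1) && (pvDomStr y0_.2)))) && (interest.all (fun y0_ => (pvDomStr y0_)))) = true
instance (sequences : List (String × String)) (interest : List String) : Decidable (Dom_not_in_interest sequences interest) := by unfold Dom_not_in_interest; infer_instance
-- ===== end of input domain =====

-- B strips the interest keys by recursion, looks each remaining sequence up ONCE into a list, and
-- collects differing positions into a set (sorted at the end) instead of A's per-position counter.

-- ===== PORT A =====
-- A's 'for i in interest: other.remove(i)' loop (ValueError = none)
def pvRemoveAll (keys : List String) (interest : List String) : Option (List String) :=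
  interest.foldl (fun o i => o.bind (fun l => PySem.List.remove? l i)) (some keys)

def not_in_interest (sequences : List (String × String)) (interest : List String) : List Int :=
  match PySem.List.pyGet? interest 0 with
  | none => []                                   -- IndexError: interest[0]; outside Pre_
  | some i0 =>
  match PySem.Dict.get? (PySem.Dict.ofList sequences) i0 with
  | none => []                                   -- KeyError: sequences[interest[0]]; outside Pre_
  | some first =>
  match pvRemoveAll (PySem.Dict.keys (PySem.Dict.ofList sequences)) interest with
  | none => []                                   -- ValueError: other.remove(i); outside Pre_
  | some other =>
    -- for j in range(len(first_seq)): count the other sequences differing at j; append j if any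
    -- (a = sequences[i] is inlined; i ∈ other ⊆ keys, so that lookup never raises in Python;
    --  a[j] != first_seq[j] is compared as Option Char — exact where Pre_ keeps a[j] in range)
    (PySem.List.pyRange 0 (PySem.Str.len first) 1).foldl (fun assoc j =>
      if other.foldl (fun c i =>
           if PySem.Str.pyGet? (PySem.Dict.getD (PySem.Dict.ofList sequences) i "") j
                ≠ PySem.Str.pyGet? first j then c + 1 else c) (0 : Int) > 0
      then assoc ++ [j] else assoc) []

-- ===== PORT B =====
-- B's recursive '_without' helper (ValueError from keys.remove = none)
def pvWithout (keys : List String) (interest : List String) : Option (List String) :=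
  match interest with
  | [] => some keys
  | i :: rest => (PySem.List.remove? keys i).bind (fun ks => pvWithout ks rest)

def not_in_interest_alt (sequences : List (String × String)) (interest : List String) : List Int :=
  match PySem.List.pyGet? interest 0 with
  | none => []
  | some i0 =>
  match PySem.Dict.get? (PySem.Dict.ofList sequences) i0 with
  | none => []
  | some first =>
  match pvWithout (PySem.Dict.keys (PySem.Dict.ofList sequences)) interest with
  | none => []
  | some names =>
    -- others = [sequences[name] for name in _without(...)]  (each name is a key, so getD hits)
    -- for seq in others: for j in range(len(first_seq)): if seq[j] != first_seq[j]: diff_sites.add(j)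
    PySem.List.sorted
      ((names.map (fun name => PySem.Dict.getD (PySem.Dict.ofList sequences) name "")).foldl
        (fun s seq =>
          (PySem.List.pyRange 0 (PySem.Str.len first) 1).foldl
            (fun s j => if PySem.Str.pyGet? seq j ≠ PySem.Str.pyGet? first j
                        then PySem.Set.add s j else s) s)
        PySem.Set.empty)
      (fun x => x) false

-- ===== PRECONDITION & SPEC =====
-- Pre_: exactly where the Python A returns: interest nonempty with distinct entries that are all keys of
-- sequences (else IndexError/KeyError/ValueError), and no other sequence shorter than first_seq (else IndexError).
def Pre_not_in_interest (sequences : List (String × String)) (interest : List String) : Prop :=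
  interest ≠ [] ∧ interest.Nodup ∧
  (∀ i ∈ interest, i ∈ (PySem.Dict.ofList sequences).keys) ∧
  (∀ p ∈ (PySem.Dict.ofList sequences).items, p.1 ∉ interest →
    PySem.Str.len ((PySem.Dict.ofList sequences).getD interest.head! "") ≤ PySem.Str.len p.2)
instance (sequences : List (String × String)) (interest : List String) : Decidable (Pre_not_in_interest sequences interest) := by unfold Pre_not_in_interest; infer_instance

def pvWitness_not_in_interest : (List (String × String)) × List String :=
  ([("r", "AC"), ("s", "AG")], ["r"])

def Spec_not_in_interest (sequences : List (String × String)) (interest : List String) (out : List Int) : Prop := out = not_in_interest_alt sequences interest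
instance (sequences : List (String × String)) (interest : List String) (out : List Int) : Decidable (Spec_not_in_interest sequences interest out) := by unfold Spec_not_in_interest; infer_instance

-- ===== CLAIM (what is proved, stated in full; the proofs are below) =====
def Claim_equal_not_in_interest : Prop := ∀ (sequences : List (String × String)) (interest : List String), Dom_not_in_interest sequences interest → Pre_not_in_interest sequences interest → Spec_not_in_interest sequences interest (not_in_interest sequences interest)

-- ===== LEMMAS AND PROOFS =====

-- A's remove fold over a dead accumulator stays dead
theorem pvRemoveAll_none (interest : List String) :
    interest.foldl (fun o i => o.bind (fun l => PySem.List.remove? l i)) (none : Option (List String)) = none := by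
  induction interest with
  | nil => rfl
  | cons i rest ih => simpa using ih

-- A's remove fold and B's recursive strip are the same function
theorem pvRemoveAll_eq_pvWithout : ∀ (interest keys : List String),
    pvRemoveAll keys interest = pvWithout keys interest := by
  intro interest
  induction interest with
  | nil => intro keys; rfl
  | cons i rest ih =>
    intro keys
    show rest.foldl (fun o i => o.bind (fun l => PySem.List.remove? l i))
      (PySem.List.remove? keys i) = (PySem.List.remove? keys i).bind (fun ks => pvWithout ks rest)
    cases h : PySem.List.remove? keys i with
    | none => simpa using pvRemoveAll_none rest
    | some ks => exact ih ks

-- membership through B's inner 'if seq[j] != first_seq[j]: diff_sites.add(j)' loop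
theorem mem_foldl_add_if (first seq : String) (l : List Int) :
    ∀ (s : PySem.Set Int) (x : Int),
      x ∈ l.foldl (fun s j => if PySem.Str.pyGet? seq j ≠ PySem.Str.pyGet? first j
                              then PySem.Set.add s j else s) s ↔
        x ∈ s ∨ (x ∈ l ∧ PySem.Str.pyGet? seq x ≠ PySem.Str.pyGet? first x) := by
  induction l with
  | nil => simp
  | cons h t ih =>
    intro s x
    simp only [List.foldl_cons, List.mem_cons]
    rw [ih]
    by_cases hc : PySem.Str.pyGet? seq h ≠ PySem.Str.pyGet? first h
    · rw [if_pos hc]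
      simp only [PySem.Set.mem_add]
      constructor
      · rintro ((h1 | rfl) | h1)
        · exact Or.inl h1
        · exact Or.inr ⟨Or.inl rfl, hc⟩
        · exact Or.inr ⟨Or.inr h1.1, h1.2⟩
      · rintro (h1 | ⟨(rfl | h1), h2⟩)
        · exact Or.inl (Or.inl h1)
        · exact Or.inl (Or.inr rfl)
        · exact Or.inr ⟨h1, h2⟩
    · rw [if_neg hc]
      constructor
      · rintro (h1 | h1)
        · exact Or.inl h1
        · exact Or.inr ⟨Or.inr h1.1, h1.2⟩
      · rintro (h1 | ⟨(rfl | h1), h2⟩)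
        · exact Or.inl h1
        · exact absurd h2 hc
        · exact Or.inr ⟨h1, h2⟩

-- nodup through B's inner loop
theorem nodup_foldl_add_if (first seq : String) (l : List Int) :
    ∀ (s : PySem.Set Int), s.Nodup →
      (l.foldl (fun s j => if PySem.Str.pyGet? seq j ≠ PySem.Str.pyGet? first j
                           then PySem.Set.add s j else s) s).Nodup := by
  induction l with
  | nil => intro s hs; simpa using hs
  | cons h t ih =>
    intro s hs
    simp only [List.foldl_cons]
    apply ih
    split
    · exact PySem.Set.nodup_add s h hs
    · exact hs

-- membership through B's outer 'for seq in others' loop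
theorem mem_foldl_outer (first : String) (seqs : List String) (l : List Int) :
    ∀ (s : PySem.Set Int) (x : Int),
      x ∈ seqs.foldl (fun s seq =>
            l.foldl (fun s j => if PySem.Str.pyGet? seq j ≠ PySem.Str.pyGet? first j
                                then PySem.Set.add s j else s) s) s ↔
        x ∈ s ∨ ∃ q ∈ seqs, x ∈ l ∧ PySem.Str.pyGet? q x ≠ PySem.Str.pyGet? first x := by
  induction seqs with
  | nil => simp
  | cons h t ih =>
    intro s x
    simp only [List.foldl_cons]
    rw [ih, mem_foldl_add_if]
    constructor
    · rintro ((h1 | h1) | ⟨q, hq, h1⟩)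
      · exact Or.inl h1
      · exact Or.inr ⟨h, by simp, h1⟩
      · exact Or.inr ⟨q, by simp [hq], h1⟩
    · rintro (h1 | ⟨q, hq, h1⟩)
      · exact Or.inl (Or.inl h1)
      · rcases List.mem_cons.mp hq with rfl | hq
        · exact Or.inl (Or.inr h1)
        · exact Or.inr ⟨q, hq, h1⟩

theorem nodup_foldl_outer (first : String) (seqs : List String) (l : List Int) :
    ∀ (s : PySem.Set Int), s.Nodup →
      (seqs.foldl (fun s seq =>
        l.foldl (fun s j => if PySem.Str.pyGet? seq j ≠ PySem.Str.pyGet? first j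
                            then PySem.Set.add s j else s) s) s).Nodup := by
  induction seqs with
  | nil => intro s hs; simpa using hs
  | cons h t ih =>
    intro s hs
    exact ih _ (nodup_foldl_add_if first h l s hs)

-- ===== VERDICT (by name: the statement is the Claim_ definition above) =====
theorem not_in_interest_spec : Claim_equal_not_in_interest := by
  intro sequences interest _ _
  unfold Spec_not_in_interest not_in_interest not_in_interest_alt
  rw [← pvRemoveAll_eq_pvWithout]
  cases hg : PySem.List.pyGet? interest 0 with
  | none => rfl
  | some i0 =>
  cases hf : PySem.Dict.get? (PySem.Dict.ofList sequences) i0 with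
  | none => simp only [hf]
  | some first =>
  cases hr : pvRemoveAll (PySem.Dict.keys (PySem.Dict.ofList sequences)) interest with
  | none => simp only [hf]
  | some other =>
  simp only [hf]
  -- A's inner counter fold is 'some other sequence differs at j'
  have hcongr : ∀ (acc : List Int) (j : Int), j ∈ PySem.List.pyRange 0 (PySem.Str.len first) 1 →
      (if other.foldl (fun c i =>
           if PySem.Str.pyGet? (PySem.Dict.getD (PySem.Dict.ofList sequences) i "") j
                ≠ PySem.Str.pyGet? first j then c + 1 else c) (0 : Int) > 0
       then acc ++ [j] else acc) =
      (if other.any (fun name =>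
          decide (PySem.Str.pyGet? (PySem.Dict.getD (PySem.Dict.ofList sequences) name "") j
            ≠ PySem.Str.pyGet? first j)) = true then acc ++ [j] else acc) := by
    intro acc j _
    rw [PySem.List.foldl_ite_add_one
      (fun i => PySem.Str.pyGet? (PySem.Dict.getD (PySem.Dict.ofList sequences) i "") j
          ≠ PySem.Str.pyGet? first j) other 0]
    by_cases hany : other.any (fun name =>
        decide (PySem.Str.pyGet? (PySem.Dict.getD (PySem.Dict.ofList sequences) name "") j
          ≠ PySem.Str.pyGet? first j)) = true
    · rw [if_pos hany, if_pos ?_]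
      have := List.countP_pos_iff.mpr (List.any_eq_true.mp hany)
      omega
    · rw [if_neg hany, if_neg ?_]
      have : List.countP (fun name =>
          decide (PySem.Str.pyGet? (PySem.Dict.getD (PySem.Dict.ofList sequences) name "") j
            ≠ PySem.Str.pyGet? first j)) other = 0 := by
        rw [List.countP_eq_zero]
        intro n hn hcn
        exact hany (List.any_eq_true.mpr ⟨n, hn, hcn⟩)
      omega
  rw [PySem.List.foldl_congr_mem (PySem.List.pyRange 0 (PySem.Str.len first) 1) _
    (fun assoc j => if other.any (fun name =>
      decide (PySem.Str.pyGet? (PySem.Dict.getD (PySem.Dict.ofList sequences) name "") j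
        ≠ PySem.Str.pyGet? first j)) = true then assoc ++ [j] else assoc) [] hcongr,
    PySem.List.foldl_append_if_eq_filter (fun j => other.any (fun name =>
      decide (PySem.Str.pyGet? (PySem.Dict.getD (PySem.Dict.ofList sequences) name "") j
        ≠ PySem.Str.pyGet? first j))) (PySem.List.pyRange 0 (PySem.Str.len first) 1) []]
  rw [List.nil_append]
  symm
  apply PySem.List.sorted_eq_of_perm_of_pairwise_lt
  · rw [List.perm_ext_iff_of_nodup
      (List.Nodup.filter _ (PySem.List.nodup_pyRange_one 0 (PySem.Str.len first)))
      (nodup_foldl_outer first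
        (other.map (fun name => PySem.Dict.getD (PySem.Dict.ofList sequences) name ""))
        (PySem.List.pyRange 0 (PySem.Str.len first) 1) PySem.Set.empty List.nodup_nil)]
    intro x
    rw [List.mem_filter, mem_foldl_outer first
      (other.map (fun name => PySem.Dict.getD (PySem.Dict.ofList sequences) name ""))
      (PySem.List.pyRange 0 (PySem.Str.len first) 1)]
    simp only [PySem.Set.empty, List.not_mem_nil, false_or, List.any_eq_true,
      decide_eq_true_eq, List.mem_map]
    constructor
    · rintro ⟨hx, n, hn, hc⟩
      exact ⟨_, ⟨n, hn, rfl⟩, hx, hc⟩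
    · rintro ⟨q, ⟨n, hn, rfl⟩, hx, hc⟩
      exact ⟨hx, n, hn, hc⟩
  · exact List.Pairwise.filter _ (PySem.List.pairwise_lt_pyRange_one 0 (PySem.Str.len first))
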